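-- pv_equiv track=rewrite | github.com/ngeodesic-ai/ngf-alpha | dev/small-benchmarks-depr/stage11-well-benchmark-v10f.py | _expected_after_seed
-- ===== SOURCE A (Python) =====
-- def _expected_after_seed(r:int, c:int):
--     seq = []
--     for i in range(r):
--         for j in range(c):
--             seq.append('d')
--             if j < c-1: seq.append(',')
--         seq.append(']')
--         if i < r-1: seq += [',','[']
--     seq.append(']')
--     return seq
-- ===== SOURCE B (Python) =====
-- def _expected_after_seed(r:int, c:int):
--     # Build by replication and trimming instead of per-cell loops:
--     # a row is c 'd's joined by ',' plus ']'; the body is r rows joined by ',['.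
--     row = ['d', ','] * c
--     row = row[:-1]          # drop the trailing comma (no-op when c == 0)
--     row.append(']')
--     body = (row + [',', '[']) * r
--     body = body[:-2]        # drop the trailing separator (empty when r <= 0)
--     body.append(']')
--     return body
-- ===== Notes on version B (the rewrite author's own statement) =====
-- stated objective: alternative
-- what changed: B builds the per-row token list once and then assembles the result by concatenating r copies of it with separators, instead of A's fused nested loop that re-evaluates the comma test at every cell of every row.
import Mathlib
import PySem

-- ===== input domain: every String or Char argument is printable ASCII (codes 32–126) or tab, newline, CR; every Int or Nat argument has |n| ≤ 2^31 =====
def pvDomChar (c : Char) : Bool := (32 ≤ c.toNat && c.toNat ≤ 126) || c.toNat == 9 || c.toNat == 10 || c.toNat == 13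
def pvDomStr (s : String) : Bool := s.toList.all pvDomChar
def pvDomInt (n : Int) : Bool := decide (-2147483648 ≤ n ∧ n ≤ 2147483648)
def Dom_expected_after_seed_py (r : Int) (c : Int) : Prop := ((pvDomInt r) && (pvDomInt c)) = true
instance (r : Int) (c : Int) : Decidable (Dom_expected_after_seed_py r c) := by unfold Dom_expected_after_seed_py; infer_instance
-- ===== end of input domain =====

-- B builds the token sequence by replicating a row pattern and trimming the trailing separators, instead of A's fused nested per-cell loop (alternative decomposition, same asymptotic cost).


-- ===== PORT A =====
def expected_after_seed_py (r : Int) (c : Int) : List String :=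
  let seq := (PySem.List.pyRange 0 r 1).foldl (fun seq i =>
    let seq := (PySem.List.pyRange 0 c 1).foldl (fun s j =>
      let s := s ++ ["d"]
      if j < c - 1 then s ++ [","] else s) seq
    let seq := seq ++ ["]"]
    if i < r - 1 then seq ++ [",", "["] else seq) []
  seq ++ ["]"]

-- ===== PORT B =====
-- 'lst * n' is ported as (List.replicate n.toNat lst).flatten; 'lst[:-k]' as PySem.List.slice.
def expected_after_seed_py_alt (r : Int) (c : Int) : List String :=
  let row := (List.replicate c.toNat ["d", ","]).flatten          -- ['d', ','] * c
  let row := PySem.List.slice row none (some (-1))                -- row[:-1]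
  let row := row ++ ["]"]                                         -- row.append(']')
  let body := (List.replicate r.toNat (row ++ [",", "["])).flatten -- (row + [',','[']) * r
  let body := PySem.List.slice body none (some (-2))              -- body[:-2]
  body ++ ["]"]                                                   -- body.append(']')

-- ===== PRECONDITION & SPEC =====
def Spec_expected_after_seed_py (r : Int) (c : Int) (out : List String) : Prop := out = expected_after_seed_py_alt r c
instance (r : Int) (c : Int) (out : List String) : Decidable (Spec_expected_after_seed_py r c out) := by unfold Spec_expected_after_seed_py; infer_instance

-- ===== CLAIM (what is proved, stated in full; the proofs are below) =====
def Claim_equal_expected_after_seed_py : Prop := ∀ (r : Int) (c : Int), Dom_expected_after_seed_py r c → Spec_expected_after_seed_py r c (expected_after_seed_py r c)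

-- ===== LEMMAS AND PROOFS =====

-- flatMap of a constant is a flattened replicate
theorem pv_flatMap_const {α β : Type} (l : List α) (v : List β) :
    l.flatMap (fun _ => v) = (List.replicate l.length v).flatten := by
  induction l with
  | nil => simp
  | cons a t ih => simp [List.flatMap_cons, List.replicate_succ, ih]

-- lst[:-1] of a list ending in one element drops it
theorem pv_slice_neg_one {α : Type} (Y : List α) (a : α) :
    PySem.List.slice (Y ++ [a]) none (some (-1)) = Y := by
  rw [PySem.List.slice_to_neg_one]
  exact List.dropLast_concat

-- lst[:-2] of a list ending in two elements drops them
theorem pv_slice_neg_two {α : Type} (Y : List α) (a b : α) :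
    PySem.List.slice (Y ++ [a, b]) none (some (-2)) = Y := by
  rw [PySem.List.slice_to_neg_ofNat _ 2 (by omega)]
  have h : (Y ++ [a, b]).length - 2 = Y.length := by simp
  rw [h, List.take_left]

-- each inner step only appends on the right, so a foldl from `init` is `init ++` the foldl from []
theorem pv_inner_shift (c : Int) (l : List Int) (init : List String) :
    l.foldl (fun s j => let s := s ++ ["d"]; if j < c - 1 then s ++ [","] else s) init
      = init ++ l.foldl (fun s j => let s := s ++ ["d"]; if j < c - 1 then s ++ [","] else s) [] := by
  induction l generalizing init with
  | nil => simp
  | cons a t ih =>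
    simp only [List.foldl_cons]
    rw [ih, ih (if a < c - 1 then [] ++ ["d"] ++ [","] else [] ++ ["d"])]
    split <;> simp

-- A's inner per-row loop equals B's replicated-and-trimmed row (without the closing ']')
theorem pv_row_eq (c : Int) :
    (PySem.List.pyRange 0 c 1).foldl (fun s j =>
        let s := s ++ ["d"]
        if j < c - 1 then s ++ [","] else s) []
      = PySem.List.slice ((List.replicate c.toNat ["d", ","]).flatten) none (some (-1)) := by
  by_cases hc : 0 < c
  · have hb : (0:Int) ≤ c - 1 := by omega
    have hsplit : PySem.List.pyRange 0 c 1 = PySem.List.pyRange 0 (c-1) 1 ++ [c-1] := by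
      have := PySem.List.pyRange_one_succ_right (a := 0) (b := c - 1) hb
      simpa using this
    rw [hsplit, List.foldl_append]
    have hmem : ∀ (acc : List String) (x : Int), x ∈ PySem.List.pyRange 0 (c-1) 1 →
        (fun (s : List String) (j : Int) => let s := s ++ ["d"]; if j < c - 1 then s ++ [","] else s) acc x
          = acc ++ ["d", ","] := by
      intro acc x hx
      have hx' := (PySem.List.mem_pyRange_one.mp hx).2
      simp [hx']
    have hpre : (PySem.List.pyRange 0 (c-1) 1).foldl (fun s j =>
        let s := s ++ ["d"]
        if j < c - 1 then s ++ [","] else s) []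
        = (List.replicate (c-1).toNat ["d", ","]).flatten := by
      rw [PySem.List.foldl_congr_mem _ _ (fun (s : List String) (_ : Int) => s ++ ["d", ","]) _ hmem,
          PySem.List.foldl_append_eq_flatMap, pv_flatMap_const]
      simp [PySem.List.length_pyRange_one]
    rw [hpre]
    have hlast : ¬ (c - 1 < c - 1) := by omega
    simp only [List.foldl_cons, List.foldl_nil]
    rw [if_neg hlast]
    have hct : c.toNat = (c-1).toNat + 1 := by omega
    rw [hct, List.replicate_succ', List.flatten_append]
    have hre : (List.replicate (c-1).toNat ["d", ","]).flatten ++ [["d", ","]].flatten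
        = ((List.replicate (c-1).toNat ["d", ","]).flatten ++ ["d"]) ++ [","] := by simp
    rw [hre, pv_slice_neg_one]
  · have hct : c.toNat = 0 := by omega
    have hr : PySem.List.pyRange 0 c 1 = [] := by
      rw [PySem.List.pyRange_one]
      simp
      omega
    rw [hr, hct]
    simp [PySem.List.slice_to_neg_one]

-- ===== VERDICT (by name: the statement is the Claim_ definition above) =====
theorem expected_after_seed_py_spec : Claim_equal_expected_after_seed_py := by
  intro r c _
  unfold Spec_expected_after_seed_py expected_after_seed_py expected_after_seed_py_alt
  simp only
  rw [← pv_row_eq]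
  set K := (PySem.List.pyRange 0 c 1).foldl (fun s j =>
      let s := s ++ ["d"]
      if j < c - 1 then s ++ [","] else s) [] with hK
  have houter : ∀ (acc : List String) (i : Int), i ∈ PySem.List.pyRange 0 r 1 →
      (fun (seq : List String) (i : Int) =>
        let seq := (PySem.List.pyRange 0 c 1).foldl (fun s j =>
          let s := s ++ ["d"]
          if j < c - 1 then s ++ [","] else s) seq
        let seq := seq ++ ["]"]
        if i < r - 1 then seq ++ [",", "["] else seq) acc i
      = acc ++ (if i < r - 1 then (K ++ ["]"]) ++ [",", "["] else K ++ ["]"]) := by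
    intro acc i _
    simp only
    rw [pv_inner_shift, ← hK]
    split <;> simp
  rw [PySem.List.foldl_congr_mem _ _ (fun (acc : List String) (i : Int) => acc ++ (if i < r - 1 then (K ++ ["]"]) ++ [",", "["] else K ++ ["]"])) _ houter, PySem.List.foldl_append_eq_flatMap]
  by_cases hr : 0 < r
  · have hb : (0:Int) ≤ r - 1 := by omega
    have hsplit : PySem.List.pyRange 0 r 1 = PySem.List.pyRange 0 (r-1) 1 ++ [r-1] := by
      have := PySem.List.pyRange_one_succ_right (a := 0) (b := r - 1) hb
      simpa using this
    rw [hsplit, List.flatMap_append]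
    have hpre : (PySem.List.pyRange 0 (r-1) 1).flatMap
        (fun i => if i < r - 1 then (K ++ ["]"]) ++ [",", "["] else K ++ ["]"])
        = (List.replicate (r-1).toNat ((K ++ ["]"]) ++ [",", "["])).flatten := by
      have hmem : ∀ i ∈ PySem.List.pyRange 0 (r-1) 1,
          (if i < r - 1 then (K ++ ["]"]) ++ [",", "["] else K ++ ["]"]) = (K ++ ["]"]) ++ [",", "["] := by
        intro i hi
        have hi' := (PySem.List.mem_pyRange_one.mp hi).2
        simp [hi']
      rw [List.flatMap_congr hmem, pv_flatMap_const]
      simp [PySem.List.length_pyRange_one]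
    have hrt : r.toNat = (r-1).toNat + 1 := by omega
    rw [hpre, hrt, List.replicate_succ', List.flatten_append]
    have hre : (List.replicate (r-1).toNat (K ++ ["]"] ++ [",", "["])).flatten
          ++ [K ++ ["]"] ++ [",", "["]].flatten
        = (((List.replicate (r-1).toNat (K ++ ["]"] ++ [",", "["])).flatten ++ (K ++ ["]"])) ++ [",", "["]) := by
      simp
    rw [hre]
    have h2 : PySem.List.slice
        ((((List.replicate (r-1).toNat (K ++ ["]"] ++ [",", "["])).flatten ++ (K ++ ["]"])) ++ [",", "["]))
        none (some (-2))
        = (List.replicate (r-1).toNat (K ++ ["]"] ++ [",", "["])).flatten ++ (K ++ ["]"]) :=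
      pv_slice_neg_two _ "," "["
    rw [h2]
    simp [List.flatMap_cons]
  · have hrt : r.toNat = 0 := by omega
    have hrange : PySem.List.pyRange 0 r 1 = [] := by
      rw [PySem.List.pyRange_one]
      simp
      omega
    rw [hrange, hrt]
    simp [PySem.List.slice]
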